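-- pv_equiv track=rewrite | github.com/mlegoue/convex | Concept/concept.py | find_concept
-- ===== SOURCE A (Python) =====
-- def powerset(seq):
--     """
--     Returns all the subsets of this set. This is a generator.
--     """
--     if len(seq) <= 1:
--         yield seq
--         yield []
--     else:
--         for item in powerset(seq[1:]):
--             yield [seq[0]]+item
--             yield item
--
-- def find_intention(attributs, extension):
--     intention = []
--     for attribut in attributs:
--         if set(extension).issubset(attribut):
--             intention.append(attribut)
--     return intention
--
-- def find_extension(objets, intention):
--     extension = []
--     for objet in objets:
--         in_attribut = True
--         for attribut in intention:
--             if objet not in attribut: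
--                 in_attribut = False
--         if in_attribut:
--             extension.append(objet)
--     return extension
--
-- def find_concept(objets, attributs):
--     subsets = powerset(objets)
--     concept = {}
--     for subset in subsets:
--         intention = find_intention(attributs, subset)
--         extension = find_extension(objets, intention)
--         if set(subset) == set(extension):
--             concept[''.join(list(map(str, subset)))] = intention
--     return concept
-- ===== SOURCE B (Python) =====
-- def find_concept(objets, attributs):
--     attr_pairs = [(a, set(a)) for a in attributs]
--     n = len(objets)
--     concept = {}
--     for mask in reversed(range(1 << n)):
--         subset = [o for i, o in enumerate(objets) if mask >> i & 1]
--         members = set(subset)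
--         intent = [(a, s) for a, s in attr_pairs if members <= s]
--         if all(o in members for o in objets if all(o in s for _, s in intent)):
--             concept[''.join(map(str, subset))] = [a for a, _ in intent]
--     return concept
-- ===== Notes on version B (the rewrite author's own statement) =====
-- stated objective: alternative
-- what changed: Replaces A's recursive powerset generator and its per-subset find_intention/find_extension list rescans by a bitmask enumeration over precomputed attribute sets, testing closedness directly as extension-subset-of-subset without materialising the extension.
import Mathlib
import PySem

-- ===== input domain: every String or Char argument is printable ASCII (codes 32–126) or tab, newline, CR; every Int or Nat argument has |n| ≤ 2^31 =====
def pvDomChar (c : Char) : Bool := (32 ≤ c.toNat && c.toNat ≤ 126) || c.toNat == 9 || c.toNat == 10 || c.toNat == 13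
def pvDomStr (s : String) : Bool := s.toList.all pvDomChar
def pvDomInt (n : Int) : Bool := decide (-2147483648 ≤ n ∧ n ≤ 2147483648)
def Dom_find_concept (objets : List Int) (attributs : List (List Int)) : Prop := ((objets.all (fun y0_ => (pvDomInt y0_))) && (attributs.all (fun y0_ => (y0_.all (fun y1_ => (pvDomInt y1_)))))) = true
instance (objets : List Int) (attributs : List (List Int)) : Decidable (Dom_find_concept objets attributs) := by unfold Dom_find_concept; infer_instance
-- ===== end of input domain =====

-- B replaces A's recursive powerset generator and its per-subset list rescans by a bitmask
-- enumeration with precomputed attribute sets, testing closedness (extension ⊆ subset)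
-- directly without materialising the extension; same return value everywhere.

-- ===== PORT A =====
-- powerset(seq): 'if len(seq) <= 1: yield seq; yield []' else interleave with/without seq[0]
def powersetA : List Int → List (List Int)
  | [] => [[], []]
  | [x] => [[x], []]
  | x :: y :: ys => (powersetA (y :: ys)).flatMap (fun item => [x :: item, item])

-- find_intention: append attribut when set(extension).issubset(attribut)
def find_intentionA (attributs : List (List Int)) (extension : List Int) : List (List Int) :=
  attributs.foldl
    (fun intention a => if extension.all (fun x => a.contains x) then intention ++ [a] else intention) []

-- find_extension: flag loop 'if objet not in attribut: in_attribut = False'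
def find_extensionA (objets : List Int) (intention : List (List Int)) : List Int :=
  objets.foldl
    (fun ext o =>
      if intention.foldl (fun b a => if !(a.contains o) then false else b) true then ext ++ [o] else ext) []

-- set(s) == set(t)  (mutual inclusion; exact for Python set equality of int lists)
def setEqA (s t : List Int) : Bool :=
  s.all (fun x => t.contains x) && t.all (fun x => s.contains x)

def find_concept (objets : List Int) (attributs : List (List Int)) : List (String × List (List Int)) :=
  ((powersetA objets).foldl
    (fun concept subset =>
      let intention := find_intentionA attributs subset
      let extension := find_extensionA objets intention
      if setEqA subset extension then
        concept.insert (PySem.Str.join "" (subset.map PySem.Int.toStr)) intention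
      else concept)
    (PySem.Dict.empty : PySem.Dict String (List (List Int)))).items

-- ===== PORT B =====
def find_concept_alt (objets : List Int) (attributs : List (List Int)) : List (String × List (List Int)) :=
  let attrPairs : List (List Int × PySem.Set Int) := attributs.map (fun a => (a, PySem.Set.ofList a))
  let n := objets.length
  -- 'for mask in reversed(range(1 << n))'; 'mask >> i & 1' is Nat.testBit mask i
  (((List.range (1 <<< n)).reverse).foldl
    (fun concept mask =>
      let subset := ((objets.zipIdx).filter (fun oi => mask.testBit oi.2)).map (fun oi => oi.1)
      let members := PySem.Set.ofList subset
      let intent := attrPairs.filter (fun p => PySem.Set.issubset members p.2)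
      if (objets.filter (fun o => intent.all (fun p => PySem.Set.contains p.2 o))).all
           (fun o => PySem.Set.contains members o) then
        concept.insert (PySem.Str.join "" (subset.map PySem.Int.toStr)) (intent.map (fun p => p.1))
      else concept)
    (PySem.Dict.empty : PySem.Dict String (List (List Int)))).items

-- ===== PRECONDITION & SPEC =====
def Spec_find_concept (objets : List Int) (attributs : List (List Int)) (out : List (String × List (List Int))) : Prop := out = find_concept_alt objets attributs
instance (objets : List Int) (attributs : List (List Int)) (out : List (String × List (List Int))) : Decidable (Spec_find_concept objets attributs out) := by unfold Spec_find_concept; infer_instance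

-- ===== CLAIM (what is proved, stated in full; the proofs are below) =====
def Claim_equal_find_concept : Prop := ∀ (objets : List Int) (attributs : List (List Int)), Dom_find_concept objets attributs → Spec_find_concept objets attributs (find_concept objets attributs)

-- ===== LEMMAS AND PROOFS =====

-- the subset selected by mask k, BIT CLEAR at position i ⇔ element i kept (A's powerset order)
def bitSub {α : Type} : List α → Nat → List α
  | [], _ => []
  | x :: xs, k => if k % 2 = 0 then x :: bitSub xs (k / 2) else bitSub xs (k / 2)

-- the subset selected by mask k, BIT SET at position i ⇔ element i kept (B's convention)
def bitSubS {α : Type} : List α → Nat → List α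
  | [], _ => []
  | x :: xs, k => if k % 2 = 1 then x :: bitSubS xs (k / 2) else bitSubS xs (k / 2)

lemma bitSub_sublist {α : Type} (l : List α) (k : Nat) : (bitSub l k).Sublist l := by
  induction l generalizing k with
  | nil => simp [bitSub]
  | cons x xs ih =>
    simp only [bitSub]
    split
    · exact (ih (k / 2)).cons₂ x
    · exact (ih (k / 2)).cons x

lemma range_double {β : Type} (t : Nat) (g : Nat → β) :
    (List.range (2 * t)).map g = (List.range t).flatMap (fun i => [g (2 * i), g (2 * i + 1)]) := by
  induction t with
  | zero => simp
  | succ t ih =>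
    have h1 : 2 * (t + 1) = (2 * t) + 1 + 1 := by ring
    rw [h1, List.range_succ, List.range_succ, List.range_succ]
    simp only [List.map_append, List.flatMap_append, ih]
    simp

lemma powersetA_cons (x : Int) (xs : List Int) :
    powersetA (x :: xs) = (List.range (2 ^ (xs.length + 1))).map (bitSub (x :: xs)) := by
  induction xs generalizing x with
  | nil => simp [powersetA, List.range_succ, bitSub]
  | cons y ys ih =>
    have h2 : (2 : Nat) ^ (ys.length + 1 + 1) = 2 * 2 ^ (ys.length + 1) := by
      rw [pow_succ]; ring
    rw [show powersetA (x :: y :: ys) = (powersetA (y :: ys)).flatMap (fun item => [x :: item, item]) from rfl,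
        ih y, List.length_cons, h2, range_double]
    rw [List.flatMap_map]
    apply List.flatMap_congr
    intro i _
    have hm : (2 * i) % 2 = 0 := by omega
    have hm1 : (2 * i + 1) % 2 = 1 := by omega
    have hd : (2 * i) / 2 = i := by omega
    have hd1 : (2 * i + 1) / 2 = i := by omega
    simp [bitSub, hm, hm1, hd, hd1]

-- reversed(range(t)) is range(t) under k ↦ t-1-k
lemma reverse_range (t : Nat) :
    (List.range t).reverse = (List.range t).map (fun k => t - 1 - k) := by
  induction t with
  | zero => simp
  | succ t ih =>
    conv_lhs => rw [List.range_succ]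
    conv_rhs => rw [List.range_succ_eq_map]
    simp only [List.reverse_append, List.reverse_singleton, List.singleton_append,
      List.map_cons, List.map_map, ih]
    congr 1
    apply List.map_congr_left
    intro k hk
    simp only [Function.comp]
    omega

-- selecting by set bits of zipIdx positions is bitSubS
lemma zipIdx_selS {α : Type} (l : List α) (k : Nat) :
    ((l.zipIdx).filter (fun pi => k.testBit pi.2)).map (fun pi => pi.1) = bitSubS l k := by
  induction l generalizing k with
  | nil => simp [bitSubS]
  | cons x xs ih =>
    rw [show (x :: xs).zipIdx = (x, 0) :: xs.zipIdx 1 from rfl, List.zipIdx_succ]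
    rw [List.filter_cons, List.filter_map]
    have hcomp : ((fun pi => k.testBit pi.2) ∘ (fun p : α × Nat => (p.1, p.2 + 1)))
        = fun pi : α × Nat => (k/2).testBit pi.2 := by
      funext p; simp [Nat.testBit_succ]
    rw [hcomp]
    simp only [Nat.testBit_zero, bitSubS]
    by_cases h : k % 2 = 1
    · simp [h, ← ih (k/2), Function.comp_def]
    · have h1 : k % 2 = 0 := by omega
      simp [h1, ← ih (k/2), Function.comp_def]

-- complement mask: bit-set selection at 2^n-1-k is bit-clear selection at k
lemma bitSubS_compl {α : Type} (l : List α) (k : Nat) (h : k < 2 ^ l.length) :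
    bitSubS l (2 ^ l.length - 1 - k) = bitSub l k := by
  induction l generalizing k with
  | nil => simp [bitSub, bitSubS]
  | cons x xs ih =>
    have hP : 0 < 2 ^ xs.length := Nat.two_pow_pos xs.length
    have hlen : (2 : Nat) ^ (x :: xs).length = 2 * 2 ^ xs.length := by
      rw [List.length_cons, pow_succ]; ring
    rw [hlen] at h ⊢
    set P := 2 ^ xs.length with hPdef
    set m := 2 * P - 1 - k with hm
    have hmod : (m % 2 = 1) ↔ (k % 2 = 0) := by omega
    have hdiv : m / 2 = P - 1 - k / 2 := by omega
    have hklt : k / 2 < P := by omega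
    simp only [bitSub, bitSubS, hdiv]
    by_cases hk : k % 2 = 0
    · rw [if_pos (hmod.mpr hk), if_pos hk, ih (k / 2) hklt]
    · rw [if_neg (fun hc => hk (hmod.mp hc)), if_neg hk, ih (k / 2) hklt]

-- iterated-if append is filter
lemma foldl_append_if_filter {α : Type} (l : List α) (p : α → Bool) :
    l.foldl (fun acc a => if p a then acc ++ [a] else acc) [] = l.filter p := by
  have := PySem.List.foldl_append_if p (fun a => a) l []
  simpa using this

-- the flag loop of find_extension is List.all
lemma foldl_flag (p : List Int → Bool) (l : List (List Int)) (b : Bool) :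
    l.foldl (fun b a => if !(p a) then false else b) b = (b && l.all p) := by
  induction l generalizing b with
  | nil => simp
  | cons a l ih =>
    rw [List.foldl_cons, ih]
    by_cases h : p a <;> simp [h]

-- set(S) <= set(a) is S.all (· in a)
lemma issubset_ofList (S a : List Int) :
    PySem.Set.issubset (PySem.Set.ofList S) (PySem.Set.ofList a) = S.all (fun x => a.contains x) := by
  rw [Bool.eq_iff_iff, PySem.Set.issubset_iff, List.all_eq_true]
  constructor
  · intro h x hx
    rw [List.contains_iff_mem]
    have := h x (by rw [PySem.Set.mem_ofList]; exact hx)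
    rwa [PySem.Set.mem_ofList] at this
  · intro h x hx
    rw [PySem.Set.mem_ofList] at hx ⊢
    have := h x hx
    rwa [List.contains_iff_mem] at this

lemma ofList_contains {α : Type} [BEq α] [LawfulBEq α] (l : List α) (x : α) :
    PySem.Set.contains (PySem.Set.ofList l) x = l.contains x := by
  rw [Bool.eq_iff_iff, PySem.Set.contains_iff, PySem.Set.mem_ofList, List.contains_iff_mem]

lemma all_congr_mem {α : Type} (l : List α) {p q : α → Bool} (h : ∀ x ∈ l, p x = q x) :
    l.all p = l.all q := by
  rw [Bool.eq_iff_iff, List.all_eq_true, List.all_eq_true]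
  constructor <;> intro hh x hx
  · rw [← h x hx]; exact hh x hx
  · rw [h x hx]; exact hh x hx

-- A's intention as a filter
lemma intentionA_filter (attributs : List (List Int)) (S : List Int) :
    find_intentionA attributs S = attributs.filter (fun a => S.all (fun x => a.contains x)) := by
  unfold find_intentionA
  exact foldl_append_if_filter attributs _

-- A's extension as a filter
lemma extensionA_filter (objets : List Int) (I : List (List Int)) :
    find_extensionA objets I = objets.filter (fun o => I.all (fun a => a.contains o)) := by
  unfold find_extensionA
  simp only [foldl_flag, Bool.true_and]
  exact foldl_append_if_filter objets _

-- the per-mask loop bodies of the two ports agree (S = bitSub objets k is B's subset too)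
lemma body_eq (objets : List Int) (attributs : List (List Int)) (S : List Int)
    (hS : S.Sublist objets) (c : PySem.Dict String (List (List Int))) :
    (let intention := find_intentionA attributs S
     let extension := find_extensionA objets intention
     if setEqA S extension then
       c.insert (PySem.Str.join "" (S.map PySem.Int.toStr)) intention
     else c)
    =
    (let attrPairs := attributs.map (fun a => (a, PySem.Set.ofList a))
     let members := PySem.Set.ofList S
     let intent := attrPairs.filter (fun p => PySem.Set.issubset members p.2)
     if (objets.filter (fun o => intent.all (fun p => PySem.Set.contains p.2 o))).all
          (fun o => PySem.Set.contains members o) then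
       c.insert (PySem.Str.join "" (S.map PySem.Int.toStr)) (intent.map (fun p => p.1))
     else c)
    := by
  set PA : List Int → Bool := fun a => S.all (fun x => a.contains x) with hPA
  -- B's intent is A's intention, paired with its set
  have hintent : (attributs.map (fun a => (a, PySem.Set.ofList a))).filter
        (fun p => PySem.Set.issubset (PySem.Set.ofList S) p.2)
      = (attributs.filter PA).map (fun a => (a, PySem.Set.ofList a)) := by
    rw [List.filter_map]
    congr 1
    apply List.filter_congr
    intro a _
    simp only [Function.comp]
    exact issubset_ofList S a
  -- the first conjunct of A's set equality always holds
  have hsub : S.all (fun x => (objets.filter (fun o =>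
      (attributs.filter PA).all (fun a => a.contains o))).contains x) = true := by
    rw [List.all_eq_true]
    intro x hx
    rw [List.contains_iff_mem, List.mem_filter]
    refine ⟨hS.subset hx, ?_⟩
    rw [List.all_eq_true]
    intro a ha
    rw [List.mem_filter] at ha
    have := ha.2
    rw [hPA, List.all_eq_true] at this
    exact this x hx
  -- B's closedness test equals A's set equality
  have hcond : ((objets.filter (fun o =>
        (((attributs.filter PA).map (fun a => (a, PySem.Set.ofList a))).all
          (fun p => PySem.Set.contains p.2 o)))).all
        (fun o => PySem.Set.contains (PySem.Set.ofList S) o))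
      = setEqA S (find_extensionA objets (find_intentionA attributs S)) := by
    rw [intentionA_filter, extensionA_filter, setEqA, hsub, Bool.true_and]
    have hfilter : objets.filter (fun o =>
          (((attributs.filter PA).map (fun a => (a, PySem.Set.ofList a))).all
            (fun p => PySem.Set.contains p.2 o)))
        = objets.filter (fun o => (attributs.filter PA).all (fun a => a.contains o)) := by
      apply List.filter_congr
      intro o _
      rw [List.all_map]
      apply all_congr_mem
      intro a _
      simp only [Function.comp]
      exact ofList_contains a o
    rw [hfilter]
    apply all_congr_mem
    intro o _
    exact ofList_contains S o
  simp only [hintent]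
  rw [hcond, intentionA_filter, ← hPA]
  simp [Function.comp_def]

theorem find_concept_spec_aux (objets : List Int) (attributs : List (List Int)) :
    find_concept objets attributs = find_concept_alt objets attributs := by
  unfold find_concept find_concept_alt
  match objets with
  | [] =>
    -- A iterates the empty subset twice; the second insert overwrites the first in place
    simp only [powersetA, List.length_nil, Nat.one_shiftLeft, pow_zero, List.range_one,
      List.reverse_singleton, List.foldl_cons, List.foldl_nil]
    rw [body_eq [] attributs [] (List.Sublist.refl _),
        body_eq [] attributs [] (List.Sublist.refl _)]
    simp only [List.zipIdx_nil, List.filter_nil, List.map_nil, List.all_nil, if_true]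
    rw [PySem.Dict.insert_insert_self]
  | x :: xs =>
    rw [powersetA_cons x xs]
    simp only [List.length_cons, Nat.one_shiftLeft]
    rw [reverse_range, List.foldl_map, List.foldl_map]
    congr 1
    apply PySem.List.foldl_congr_mem
    intro c k hk
    rw [List.mem_range] at hk
    have hsel : ((((x :: xs).zipIdx).filter
        (fun oi => (2 ^ (xs.length + 1) - 1 - k).testBit oi.2)).map (fun oi => oi.1))
        = bitSub (x :: xs) k := by
      rw [zipIdx_selS]
      have := bitSubS_compl (x :: xs) k (by simpa using hk)
      simpa using this
    simp only [hsel]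
    have hb := body_eq (x :: xs) attributs (bitSub (x :: xs) k) (bitSub_sublist (x :: xs) k) c
    simpa only [] using hb

-- ===== VERDICT (by name: the statement is the Claim_ definition above) =====
theorem find_concept_spec : Claim_equal_find_concept := by
  intro objets attributs _
  unfold Spec_find_concept
  exact find_concept_spec_aux objets attributs
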